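-- pv_equiv track=rewrite | github.com/Jc7git/PrivSPH | main.py | count_triangle_histogram
-- ===== SOURCE A (Python) =====
-- from collections import defaultdict
--
-- def count_triangle_histogram(adj_list,tri_max):
--
--     # 记录每对节点 (u, v) 参与的三角形数量
--     triangle_count_per_pair = defaultdict(int)
--     n = len(adj_list)
--     # 遍历每个节点 u
--     for u in range(len(adj_list)):
--         # 遍历节点 u 的所有邻居 v
--         for v in adj_list[u]:
--             if v > u:  # 确保每对节点只处理一次
--                 # 使用集合交集操作找出 u 和 v 的共同邻居
--                 com_ner = len(adj_list[u].intersection(adj_list[v]))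
--                 triangle_count_per_pair[(u, v)] = com_ner if com_ner < tri_max else tri_max
--
--     # 创建一个直方图
--     histogram = [0]*(tri_max+1)
--
--     # 统计每对节点参与三角形的数量频率
--     for count in triangle_count_per_pair.values():
--         histogram[count] += 1
--     histogram[0] += n*(n-1)//2 - sum(histogram)
--
--     return histogram
-- ===== SOURCE B (Python) =====
-- from collections import defaultdict
--
-- def count_triangle_histogram(adj_list, tri_max):
--     n = len(adj_list)
--     # reverse adjacency: reverse[w] = increasing list of nodes x with w in adj_list[x]
--     reverse = defaultdict(list)
--     for x in range(n):
--         for w in adj_list[x]: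
--             reverse[w].append(x)
--     # node-iterator wedge count: every pair (a, b), a < b, of nodes sharing the common
--     # neighbour w gains one triangle through w; counts kept per larger endpoint b
--     cnt = [{} for _ in range(n)]  # cnt[b][a] = triangles on the pair (a, b), a < b
--     for members in reverse.values():
--         seen = []
--         for b in members:
--             for a in seen:
--                 cnt[b][a] = cnt[b].get(a, 0) + 1
--             seen.append(b)
--     histogram = [0] * (tri_max + 1)
--     edges = 0
--     for u in range(n):
--         for v in adj_list[u]:
--             if v > u:
--                 edges += 1
--                 c = cnt[v].get(u, 0)
--                 histogram[c if c < tri_max else tri_max] += 1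
--     histogram[0] += n * (n - 1) // 2 - edges
--     return histogram
-- ===== Notes on version B (the rewrite author's own statement) =====
-- stated objective: alternative
-- what changed: Instead of A's edge-iterator (intersecting the two endpoint sets for every edge, staged in a tuple-keyed dict), B uses the node-iterator wedge algorithm: it builds a reverse-adjacency index once and, for each common neighbour w, charges one triangle to every pair of nodes adjacent to w in a per-node count table cnt[larger][smaller], then reads the accumulated per-edge counts off when tallying the histogram.
import Mathlib
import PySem

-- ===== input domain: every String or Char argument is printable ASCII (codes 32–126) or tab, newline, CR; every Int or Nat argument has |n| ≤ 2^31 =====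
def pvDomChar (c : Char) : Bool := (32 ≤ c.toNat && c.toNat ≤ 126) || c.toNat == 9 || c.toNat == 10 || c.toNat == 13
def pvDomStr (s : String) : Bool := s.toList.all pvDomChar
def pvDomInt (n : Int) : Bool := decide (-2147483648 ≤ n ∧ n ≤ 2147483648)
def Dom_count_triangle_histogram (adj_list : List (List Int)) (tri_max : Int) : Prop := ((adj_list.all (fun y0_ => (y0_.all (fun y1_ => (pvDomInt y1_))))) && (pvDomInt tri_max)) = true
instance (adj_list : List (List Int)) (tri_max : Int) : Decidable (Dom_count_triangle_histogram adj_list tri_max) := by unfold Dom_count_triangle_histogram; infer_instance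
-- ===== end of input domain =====

-- B replaces A's edge-iterator (a set intersection per edge) by the node-iterator wedge
-- algorithm: a reverse-adjacency index built once, then one triangle charged, per common
-- neighbour, to the per-node count table of the pair sharing it (alternative algorithm;
-- not claimed faster).

-- ===== PORT A =====
def count_triangle_histogram (adj_list : List (List Int)) (tri_max : Int) : List Int :=
  let n : Int := (adj_list.length : Int)
  let triangle_count_per_pair : PySem.Dict (Int × Int) Int :=
    (PySem.List.pyRange 0 (adj_list.length : Int) 1).foldl (fun d u =>
      (PySem.Set.ofList (PySem.List.pyGetD adj_list u [])).foldl (fun d v =>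
        if v > u then
          let com_ner : Int :=
            ((PySem.Set.inter (PySem.Set.ofList (PySem.List.pyGetD adj_list u []))
                (PySem.List.pyGetD adj_list v [])).length : Int)
          d.insert (u, v) (if com_ner < tri_max then com_ner else tri_max)
        else d) d) PySem.Dict.empty
  let histogram : List Int := List.replicate (tri_max + 1).toNat 0
  let histogram := triangle_count_per_pair.values.foldl
      (fun h count => PySem.List.pySetD h count (PySem.List.pyGetD h count 0 + 1)) histogram
  PySem.List.pySetD histogram 0
    (PySem.List.pyGetD histogram 0 0 + (PySem.Int.floordiv (n * (n - 1)) 2 - histogram.sum))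

-- ===== PORT B =====
def count_triangle_histogram_alt (adj_list : List (List Int)) (tri_max : Int) : List Int :=
  let n : Int := (adj_list.length : Int)
  let reverse : PySem.Dict Int (List Int) :=
    (PySem.List.pyRange 0 n 1).foldl (fun d x =>
      (PySem.Set.ofList (PySem.List.pyGetD adj_list x [])).foldl (fun d w =>
        d.modify w [] (· ++ [x])) d) PySem.Dict.empty
  let cnt : List (PySem.Dict Int Int) :=
    reverse.values.foldl (fun cnt members =>
      (members.foldl (fun st b =>
        (st.2.foldl (fun cnt a =>
          PySem.List.pySetD cnt b
            ((PySem.List.pyGetD cnt b PySem.Dict.empty).insert a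
              ((PySem.List.pyGetD cnt b PySem.Dict.empty).getD a 0 + 1))) st.1,
         st.2 ++ [b])) (cnt, ([] : List Int))).1)
      (List.replicate n.toNat PySem.Dict.empty)
  let st :=
    (PySem.List.pyRange 0 n 1).foldl (fun st u =>
      (PySem.Set.ofList (PySem.List.pyGetD adj_list u [])).foldl (fun st v =>
        if v > u then
          let c : Int := (PySem.List.pyGetD cnt v PySem.Dict.empty).getD u 0
          (st.1 + 1,
            PySem.List.pySetD st.2 (if c < tri_max then c else tri_max)
              (PySem.List.pyGetD st.2 (if c < tri_max then c else tri_max) 0 + 1))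
        else st) st)
      ((0 : Int), List.replicate (tri_max + 1).toNat 0)
  PySem.List.pySetD st.2 0
    (PySem.List.pyGetD st.2 0 0 + (PySem.Int.floordiv (n * (n - 1)) 2 - st.1))

-- ===== PRECONDITION & SPEC =====
-- Pre_ excludes exactly the inputs where Python A raises IndexError: tri_max < 0 (histogram
-- access) and any neighbour v > u with v >= n (A indexes adj_list[v]).
def Pre_count_triangle_histogram (adj_list : List (List Int)) (tri_max : Int) : Prop :=
  0 ≤ tri_max ∧ ∀ i : Nat, ∀ _ : i < adj_list.length,
    ∀ v ∈ adj_list[i], (i : Int) < v → v < (adj_list.length : Int)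
instance (adj_list : List (List Int)) (tri_max : Int) :
    Decidable (Pre_count_triangle_histogram adj_list tri_max) := by
  unfold Pre_count_triangle_histogram; infer_instance

def pvWitness_count_triangle_histogram : List (List Int) × Int := ([[1], [0]], 2)

def Spec_count_triangle_histogram (adj_list : List (List Int)) (tri_max : Int) (out : List Int) : Prop := out = count_triangle_histogram_alt adj_list tri_max
instance (adj_list : List (List Int)) (tri_max : Int) (out : List Int) : Decidable (Spec_count_triangle_histogram adj_list tri_max out) := by unfold Spec_count_triangle_histogram; infer_instance

-- ===== CLAIM (what is proved, stated in full; the proofs are below) =====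
def Claim_equal_count_triangle_histogram : Prop := ∀ (adj_list : List (List Int)) (tri_max : Int), Dom_count_triangle_histogram adj_list tri_max → Pre_count_triangle_histogram adj_list tri_max → Spec_count_triangle_histogram adj_list tri_max (count_triangle_histogram adj_list tri_max)

-- ===== LEMMAS AND PROOFS =====

-- abbreviations for the proof (not used by the ports)
def pvAdjG (adj : List (List Int)) (u : Int) : List Int :=
  PySem.Set.ofList (PySem.List.pyGetD adj u [])
def pvPairs (adj : List (List Int)) : List (Int × Int) :=
  (PySem.List.pyRange 0 (adj.length : Int) 1).flatMap (fun u => (pvAdjG adj u).map (fun v => (u, v)))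
def pvEdges (adj : List (List Int)) : List (Int × Int) :=
  (pvPairs adj).filter (fun p => decide (p.1 < p.2))
def pvComN (adj : List (List Int)) (p : Int × Int) : Int :=
  ((PySem.Set.inter (pvAdjG adj p.1) (PySem.List.pyGetD adj p.2 [])).length : Int)
def pvCap (adj : List (List Int)) (t : Int) (p : Int × Int) : Int :=
  if pvComN adj p < t then pvComN adj p else t
def pvBump (h : List Int) (c : Int) : List Int :=
  PySem.List.pySetD h c (PySem.List.pyGetD h c 0 + 1)

-- nested loop = flat fold over the (u, v) pair list
theorem pv_foldl_nested {σ : Type} (L : List Int) (g : Int → List Int)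
    (f : σ → Int → Int → σ) (init : σ) :
    L.foldl (fun s u => (g u).foldl (fun s v => f s u v) s) init
      = (L.flatMap (fun u => (g u).map (fun v => (u, v)))).foldl (fun s p => f s p.1 p.2) init := by
  induction L generalizing init with
  | nil => rfl
  | cons a L ih => simp [List.foldl_append, List.foldl_map, ih]

theorem pv_nodup_pairs (L : List Int) (hL : L.Nodup) (g : Int → List Int)
    (hg : ∀ u ∈ L, (g u).Nodup) :
    (L.flatMap (fun u => (g u).map (fun v => (u, v)))).Nodup := by
  induction L with
  | nil => simp
  | cons a L ih =>
    rw [List.flatMap_cons, List.nodup_append]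
    obtain ⟨ha, hL'⟩ := List.nodup_cons.mp hL
    refine ⟨(hg a (by simp)).map ?_, ih hL' (fun u hu => hg u (by simp [hu])), ?_⟩
    · intro x y hxy; simpa using hxy
    · intro p hp q hq heq
      obtain ⟨v, hv, rfl⟩ := List.mem_map.mp hp
      obtain ⟨u', hu', hmem⟩ := List.mem_flatMap.mp hq
      obtain ⟨v', hv', hpe⟩ := List.mem_map.mp hmem
      have h1 : u' = a := by
        have := congrArg Prod.fst hpe
        have h2 := congrArg Prod.fst heq
        simp at this h2
        omega
      exact ha (h1 ▸ hu')

-- histogram bump lemmas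
theorem pv_bump_sum (h : List Int) (c : Int) (h0 : 0 ≤ c) (h1 : c < (h.length : Int)) :
    (pvBump h c).sum = h.sum + 1 := by
  have hc : c.toNat < h.length := by omega
  have hsplit : h.sum = (List.take c.toNat h).sum + h[c.toNat] + (List.drop (c.toNat + 1) h).sum := by
    conv_lhs => rw [← List.take_append_drop c.toNat h, List.sum_append,
      List.drop_eq_getElem_cons hc, List.sum_cons]
    ring
  rw [pvBump, PySem.List.pySetD_of_nonneg _ _ h0, PySem.List.pyGetD_of_nonneg _ _ h0,
    List.getD_eq_getElem h 0 hc, List.sum_set]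
  simp only [hc, if_pos]
  omega

theorem pv_bump_len (h : List Int) (c : Int) : (pvBump h c).length = h.length := by
  simp [pvBump, PySem.List.length_pySetD]

theorem pv_fold_bump (t : Int) (ht : 0 ≤ t) (cap : Int × Int → Int)
    (l : List (Int × Int)) (hcap : ∀ p ∈ l, 0 ≤ cap p ∧ cap p ≤ t) :
    ∀ h : List Int, h.length = (t + 1).toNat →
      (l.foldl (fun h p => pvBump h (cap p)) h).sum = h.sum + l.length ∧
      (l.foldl (fun h p => pvBump h (cap p)) h).length = h.length := by
  induction l with
  | nil => simp
  | cons p l ih =>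
    intro h hlen
    obtain ⟨hc0, hc1⟩ := hcap p (by simp)
    have hlt : cap p < (h.length : Int) := by
      rw [hlen]; omega
    have hlen' : (pvBump h (cap p)).length = (t + 1).toNat := by
      rw [pv_bump_len]; exact hlen
    obtain ⟨ihs, ihl⟩ := ih (fun q hq => hcap q (by simp [hq])) (pvBump h (cap p)) hlen'
    rw [List.foldl_cons]
    constructor
    · rw [ihs, pv_bump_sum h (cap p) hc0 hlt]; simp only [List.length_cons]; push_cast; omega
    · rw [ihl, pv_bump_len]

theorem pv_row_nodup (adj : List (List Int)) :
    ∀ u ∈ PySem.List.pyRange 0 (adj.length : Int) 1, (pvAdjG adj u).Nodup :=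
  fun _ _ => PySem.Set.nodup_ofList _

def pvHist (adj : List (List Int)) (t : Int) : List Int :=
  (pvEdges adj).foldl (fun h p => pvBump h (pvCap adj t p)) (List.replicate (t + 1).toNat 0)

theorem pv_range_nodup (n : Nat) : (PySem.List.pyRange 0 (n : Int) 1).Nodup := by
  rw [PySem.List.pyRange_zero_natCast]
  exact (List.nodup_range).map (fun a b h => by exact_mod_cast h)

theorem pv_edges_nodup (adj : List (List Int)) : (pvEdges adj).Nodup :=
  (pv_nodup_pairs _ (pv_range_nodup adj.length) _ (pv_row_nodup adj)).filter _

theorem pv_foldl_count (l : List (Int × Int)) (c : Int) :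
    l.foldl (fun s _ => s + 1) c = c + l.length := by
  induction l generalizing c with
  | nil => simp
  | cons p l ih => rw [List.foldl_cons, ih]; simp only [List.length_cons]; push_cast; omega

theorem pv_cap_bounds (adj : List (List Int)) (t : Int) (p : Int × Int) (ht : 0 ≤ t) :
    0 ≤ pvCap adj t p ∧ pvCap adj t p ≤ t := by
  have h : 0 ≤ pvComN adj p := by unfold pvComN; exact Int.natCast_nonneg _
  unfold pvCap
  constructor <;> split_ifs <;> omega

theorem pv_A_eq (adj : List (List Int)) (t : Int) :
    count_triangle_histogram adj t =
      PySem.List.pySetD (pvHist adj t) 0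
        (PySem.List.pyGetD (pvHist adj t) 0 0 +
          (PySem.Int.floordiv ((adj.length : Int) * ((adj.length : Int) - 1)) 2
            - (pvHist adj t).sum)) := by
  have hend := pv_edges_nodup adj
  have hdict : ((PySem.List.pyRange 0 (adj.length : Int) 1).foldl (fun d u =>
      (PySem.Set.ofList (PySem.List.pyGetD adj u [])).foldl (fun d v =>
        if v > u then
          d.insert (u, v)
            (if ((PySem.Set.inter (PySem.Set.ofList (PySem.List.pyGetD adj u []))
                (PySem.List.pyGetD adj v [])).length : Int) < t then
              ((PySem.Set.inter (PySem.Set.ofList (PySem.List.pyGetD adj u []))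
                (PySem.List.pyGetD adj v [])).length : Int)
            else t)
        else d) d) PySem.Dict.empty)
      = (pvEdges adj).foldl (fun d p => d.insert p (pvCap adj t p)) PySem.Dict.empty := by
    refine (pv_foldl_nested (PySem.List.pyRange 0 (adj.length : Int) 1)
      (fun u => PySem.Set.ofList (PySem.List.pyGetD adj u []))
      (fun d u v =>
        if v > u then
          d.insert (u, v)
            (if ((PySem.Set.inter (PySem.Set.ofList (PySem.List.pyGetD adj u []))
                (PySem.List.pyGetD adj v [])).length : Int) < t then
              ((PySem.Set.inter (PySem.Set.ofList (PySem.List.pyGetD adj u []))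
                (PySem.List.pyGetD adj v [])).length : Int)
            else t)
        else d) PySem.Dict.empty).trans ?_
    calc ((pvPairs adj).foldl (fun d p =>
          if p.2 > p.1 then
            d.insert (p.1, p.2)
              (if ((PySem.Set.inter (PySem.Set.ofList (PySem.List.pyGetD adj p.1 []))
                  (PySem.List.pyGetD adj p.2 [])).length : Int) < t then
                ((PySem.Set.inter (PySem.Set.ofList (PySem.List.pyGetD adj p.1 []))
                  (PySem.List.pyGetD adj p.2 [])).length : Int)
              else t)
          else d) PySem.Dict.empty)
        = (pvPairs adj).foldl (fun d p =>
            if (fun q : Int × Int => decide (q.1 < q.2)) p = true then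
              d.insert p (pvCap adj t p) else d) PySem.Dict.empty := by
          apply PySem.List.foldl_congr_mem
          intro acc p _
          rcases p with ⟨a, b⟩
          by_cases hab : a < b <;> simp [hab, pvCap, pvComN, pvAdjG]
      _ = (pvEdges adj).foldl (fun d p => d.insert p (pvCap adj t p)) PySem.Dict.empty := by
          rw [pvEdges, List.foldl_filter]
  have hvals : ((pvEdges adj).foldl (fun d p => d.insert p (pvCap adj t p))
      PySem.Dict.empty).values = (pvEdges adj).map (pvCap adj t) := by
    have hitems := PySem.Dict.items_foldl_insert_fresh (l := pvEdges adj) (k := fun p => p)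
      (v := pvCap adj t) (d := PySem.Dict.empty)
      (fun a _ => PySem.Dict.contains_empty _) (by simpa using hend)
    have hval_def : ∀ d : PySem.Dict (Int × Int) Int, d.values = d.items.map (·.2) :=
      fun _ => rfl
    rw [hval_def, hitems]
    simp [List.map_map, Function.comp_def,
      show (PySem.Dict.empty : PySem.Dict (Int × Int) Int).items = [] from rfl]
  unfold count_triangle_histogram
  simp only [hdict, hvals, List.foldl_map]
  rfl

-- ---- B side: the reverse-adjacency / wedge machinery ----

def pvRev (adj : List (List Int)) : PySem.Dict Int (List Int) :=
  (PySem.List.pyRange 0 (adj.length : Int) 1).foldl (fun d x =>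
    (pvAdjG adj x).foldl (fun d w => d.modify w [] (· ++ [x])) d) PySem.Dict.empty

def pvMembers (adj : List (List Int)) (w : Int) : List Int :=
  (PySem.List.pyRange 0 (adj.length : Int) 1).filter (fun x => decide (w ∈ pvAdjG adj x))

def pvEmit : List Int → List Int → List (Int × Int)
  | _, [] => []
  | s, b :: rest => s.map (fun a => (a, b)) ++ pvEmit (s ++ [b]) rest

def pvRevPairs (adj : List (List Int)) : List (Int × Int) :=
  (PySem.List.pyRange 0 (adj.length : Int) 1).flatMap
    (fun x => (pvAdjG adj x).map (fun w => (w, x)))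

theorem pv_mem_range (n : Nat) (u : Int) :
    u ∈ PySem.List.pyRange 0 (n : Int) 1 ↔ 0 ≤ u ∧ u < (n : Int) := by
  rw [PySem.List.pyRange_zero_natCast]
  simp only [List.mem_map, List.mem_range]
  constructor
  · rintro ⟨k, hk, rfl⟩; omega
  · rintro ⟨h0, h1⟩; exact ⟨u.toNat, by omega, by omega⟩

theorem pv_rev_flat (adj : List (List Int)) :
    pvRev adj = (pvRevPairs adj).foldl (fun d p => d.modify p.1 [] (· ++ [p.2]))
      PySem.Dict.empty := by
  rw [pvRev, pv_foldl_nested (PySem.List.pyRange 0 (adj.length : Int) 1) (pvAdjG adj)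
    (fun d x w => PySem.Dict.modify d w [] (· ++ [x])) PySem.Dict.empty]
  have h : pvRevPairs adj
      = ((PySem.List.pyRange 0 (adj.length : Int) 1).flatMap
          (fun u => (pvAdjG adj u).map (fun v => (u, v)))).map (fun p => (p.2, p.1)) := by
    simp [pvRevPairs, List.map_flatMap, List.map_map, Function.comp_def]
  rw [h, List.foldl_map]

theorem pv_rev_getD_aux (adj : List (List Int)) (w : Int) (L : List Int) :
    List.map (fun p => p.2) (List.filter (fun p => p.1 == w)
        (L.flatMap (fun x => (pvAdjG adj x).map (fun w' => (w', x)))))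
      = L.filter (fun x => decide (w ∈ pvAdjG adj x)) := by
  induction L with
  | nil => rfl
  | cons a L ih =>
    rw [List.flatMap_cons, List.filter_append, List.map_append, ih]
    by_cases h : w ∈ pvAdjG adj a
    · have hc : (pvAdjG adj a).count w = 1 :=
        List.count_eq_one_of_mem (PySem.Set.nodup_ofList _) h
      rw [List.filter_cons_of_pos (by simpa using h)]
      simp [List.filter_map, Function.comp_def, List.filter_beq, hc]
    · have hc : (pvAdjG adj a).count w = 0 := List.count_eq_zero.mpr h
      rw [List.filter_cons_of_neg (by simpa using h)]
      simp [List.filter_map, Function.comp_def, List.filter_beq, hc]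

theorem pv_rev_getD (adj : List (List Int)) (w : Int) :
    (pvRev adj).getD w [] = pvMembers adj w := by
  rw [pv_rev_flat, PySem.Dict.getD_foldl_modify_append]
  rw [show (PySem.Dict.empty : PySem.Dict Int (List Int)).getD w [] = [] from rfl]
  rw [List.nil_append, pvRevPairs, pv_rev_getD_aux]
  rfl

theorem pv_rev_keys_mem (adj : List (List Int)) (w : Int) :
    w ∈ (pvRev adj).keys
      ↔ ∃ x ∈ PySem.List.pyRange 0 (adj.length : Int) 1, w ∈ pvAdjG adj x := by
  rw [pv_rev_flat,
    PySem.Dict.keys_foldl_modify_key (pvRevPairs adj) (fun p => p.1) []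
      (fun _ p => (· ++ [p.2])) PySem.Dict.empty]
  rw [show (PySem.Dict.empty : PySem.Dict Int (List Int)).keys = [] from rfl]
  rw [PySem.Set.update_nil_left]
  rw [PySem.Set.mem_ofList]
  simp [pvRevPairs, List.mem_flatMap]

theorem pv_rev_keys_nodup (adj : List (List Int)) : (pvRev adj).keys.Nodup := by
  rw [pv_rev_flat]
  exact PySem.Dict.nodup_keys_foldl_modify_key (pvRevPairs adj) (fun p => p.1) []
    (fun _ p => (· ++ [p.2])) PySem.Dict.empty (by simp [PySem.Dict.nodup_keys_empty])

theorem pv_members_pairwise (adj : List (List Int)) (w : Int) :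
    (pvMembers adj w).Pairwise (· < ·) := by
  apply List.Pairwise.filter
  rw [PySem.List.pyRange_zero_natCast]
  exact List.Pairwise.map _ (fun a b h => by exact_mod_cast h) List.pairwise_lt_range

def pvCntBump (cnt : List (PySem.Dict Int Int)) (p : Int × Int) : List (PySem.Dict Int Int) :=
  PySem.List.pySetD cnt p.2
    ((PySem.List.pyGetD cnt p.2 PySem.Dict.empty).insert p.1
      ((PySem.List.pyGetD cnt p.2 PySem.Dict.empty).getD p.1 0 + 1))

def pvCntRead (cnt : List (PySem.Dict Int Int)) (u v : Int) : Int :=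
  (PySem.List.pyGetD cnt v PySem.Dict.empty).getD u 0

theorem pv_cnt_bump_read (cnt : List (PySem.Dict Int Int)) (a b u v : Int)
    (hb0 : 0 ≤ b) (hbl : b.toNat < cnt.length) (hv0 : 0 ≤ v) (hvl : v.toNat < cnt.length) :
    pvCntRead (pvCntBump cnt (a, b)) u v
      = pvCntRead cnt u v + (if (a, b) = ((u, v) : Int × Int) then 1 else 0) := by
  unfold pvCntRead pvCntBump
  simp only [PySem.List.pySetD_of_nonneg _ _ hb0, PySem.List.pyGetD_of_nonneg _ _ hv0,
    PySem.List.pyGetD_of_nonneg _ _ hb0, List.getD_eq_getElem?_getD, List.getElem?_set]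
  by_cases hvb : v = b
  · subst hvb
    by_cases hua : u = a
    · subst hua
      simp [hvl, PySem.Dict.getD_insert]
    · simp [hvl, PySem.Dict.getD_insert, hua, Prod.ext_iff]; omega
  · have hne : ¬ (b.toNat = v.toNat) := by omega
    have hne2 : ¬ (((a, b) : Int × Int) = (u, v)) := by simp [Prod.ext_iff]; omega
    simp [hne, hne2]

theorem pv_cnt_fold_read (l : List (Int × Int)) :
    ∀ cnt : List (PySem.Dict Int Int), (∀ p ∈ l, 0 ≤ p.2 ∧ p.2.toNat < cnt.length) →
    ∀ u v : Int, 0 ≤ v → v.toNat < cnt.length →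
      pvCntRead (l.foldl pvCntBump cnt) u v = pvCntRead cnt u v + (l.count (u, v) : Int) := by
  induction l with
  | nil => intro cnt _ u v _ _; simp
  | cons p l ih =>
    intro cnt hb u v hv0 hvl
    obtain ⟨hp0, hpl⟩ := hb p (by simp)
    have hlen : (pvCntBump cnt p).length = cnt.length := by
      simp [pvCntBump, PySem.List.length_pySetD]
    rw [List.foldl_cons,
      ih (pvCntBump cnt p) (fun q hq => by rw [hlen]; exact hb q (by simp [hq])) u v hv0
        (by rw [hlen]; exact hvl)]
    rcases p with ⟨a, b⟩
    rw [pv_cnt_bump_read cnt a b u v hp0 hpl hv0 hvl, List.count_cons]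
    by_cases h : ((a, b) : Int × Int) = (u, v)
    · simp [h]; omega
    · have : ¬ (((u, v) : Int × Int) = (a, b)) := fun hh => h hh.symm
      simp [h, this]

theorem pv_seen_fold (m : List Int) :
    ∀ (s : List Int) (cnt : List (PySem.Dict Int Int)),
      m.foldl (fun st b =>
        (st.2.foldl (fun cnt a =>
          PySem.List.pySetD cnt b
            ((PySem.List.pyGetD cnt b PySem.Dict.empty).insert a
              ((PySem.List.pyGetD cnt b PySem.Dict.empty).getD a 0 + 1))) st.1,
         st.2 ++ [b])) (cnt, s)
      = ((pvEmit s m).foldl pvCntBump cnt, s ++ m) := by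
  induction m with
  | nil => intro s cnt; simp [pvEmit]
  | cons b rest ih =>
    intro s cnt
    rw [List.foldl_cons, pvEmit, List.foldl_append, List.foldl_map, ih]
    simp [pvCntBump]

theorem pv_wedge_flat (M : List (List Int)) (C : List (PySem.Dict Int Int)) :
    M.foldl (fun cnt members =>
      (members.foldl (fun st b =>
        (st.2.foldl (fun cnt a =>
          PySem.List.pySetD cnt b
            ((PySem.List.pyGetD cnt b PySem.Dict.empty).insert a
              ((PySem.List.pyGetD cnt b PySem.Dict.empty).getD a 0 + 1))) st.1,
         st.2 ++ [b])) (cnt, ([] : List Int))).1) C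
    = (M.flatMap (fun m => pvEmit [] m)).foldl pvCntBump C := by
  induction M generalizing C with
  | nil => rfl
  | cons m M ih => rw [List.foldl_cons, pv_seen_fold, List.flatMap_cons, List.foldl_append, ih]

theorem pv_emit_mem_snd : ∀ (m s : List Int), ∀ p ∈ pvEmit s m, p.2 ∈ m := by
  intro m
  induction m with
  | nil => intro s p hp; simp [pvEmit] at hp
  | cons b rest ih =>
    intro s p hp
    rw [pvEmit, List.mem_append] at hp
    rcases hp with h | h
    · obtain ⟨a, _, rfl⟩ := List.mem_map.mp h
      simp
    · exact List.mem_cons_of_mem _ (ih (s ++ [b]) p h)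

theorem pv_count_map_pair (s : List Int) (b u v : Int) :
    (s.map (fun a => (a, b))).count (u, v) = if v = b then s.count u else 0 := by
  induction s with
  | nil => simp
  | cons a s ih =>
    rw [List.map_cons, List.count_cons, ih]
    by_cases hv : v = b <;> by_cases ha : a = u <;>
      simp [List.count_cons, hv, ha, Prod.ext_iff] <;> omega

theorem pv_emit_count (u v : Int) : ∀ (m s : List Int), (s ++ m).Pairwise (· < ·) →
    (pvEmit s m).count (u, v) = (if v ∈ m ∧ u ∈ s ++ m ∧ u < v then 1 else 0) := by
  intro m
  induction m with
  | nil => intro s _; simp [pvEmit]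
  | cons b rest ih =>
    intro s h
    obtain ⟨hs, hbr, hcross⟩ := List.pairwise_append.mp h
    obtain ⟨hb, hrest⟩ := List.pairwise_cons.mp hbr
    rw [pvEmit, List.count_append, pv_count_map_pair,
      ih (s ++ [b]) (by simpa [List.append_assoc] using h)]
    by_cases hv : v = b
    · subst hv
      have hvrest : v ∉ rest := fun hm => lt_irrefl v (hb v hm)
      by_cases hu : u ∈ s
      · have huv : u < v := hcross u hu v (by simp)
        have hcnt : s.count u = 1 :=
          List.count_eq_one_of_mem (hs.imp (fun h => ne_of_lt h)) hu
        simp [hvrest, hu, huv, hcnt]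
      · have hcnt : s.count u = 0 := List.count_eq_zero.mpr hu
        have hno : ¬ (u ∈ s ++ v :: rest ∧ u < v) := by
          rintro ⟨hm, hlt⟩
          rcases List.mem_append.mp hm with h' | h'
          · exact hu h'
          · rcases List.mem_cons.mp h' with rfl | h''
            · omega
            · have := hb u h''; omega
        have h1 : ¬(v ∈ rest ∧ u ∈ (s ++ [v]) ++ rest ∧ u < v) := fun hc => hvrest hc.1
        have h2 : ¬(v ∈ v :: rest ∧ u ∈ s ++ v :: rest ∧ u < v) := fun hc => hno ⟨hc.2.1, hc.2.2⟩
        rw [if_pos rfl, if_neg h1, if_neg h2, hcnt]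
    · have heq : ((s ++ [b]) ++ rest : List Int) = s ++ b :: rest := by simp
      simp [hv, heq, List.mem_cons]

theorem pv_sum_indicator (L : List Int) (q : Int → Prop) [DecidablePred q] :
    (L.map (fun w => if q w then (1 : Nat) else 0)).sum
      = (L.filter (fun w => decide (q w))).length := by
  induction L with
  | nil => rfl
  | cons a L ih => by_cases h : q a <;> simp [List.filter_cons, h, ih, Nat.add_comm]

theorem pv_cnt_getD (adj : List (List Int)) (u v : Int)
    (hu0 : 0 ≤ u) (hun : u < (adj.length : Int)) (huv : u < v)
    (hvn : v < (adj.length : Int)) :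
    pvCntRead ((pvRev adj).values.foldl (fun cnt members =>
      (members.foldl (fun st b =>
        (st.2.foldl (fun cnt a =>
          PySem.List.pySetD cnt b
            ((PySem.List.pyGetD cnt b PySem.Dict.empty).insert a
              ((PySem.List.pyGetD cnt b PySem.Dict.empty).getD a 0 + 1))) st.1,
         st.2 ++ [b])) (cnt, ([] : List Int))).1)
      (List.replicate ((adj.length : Int)).toNat PySem.Dict.empty)) u v
      = pvComN adj (u, v) := by
  have hnd := pv_rev_keys_nodup adj
  have hvals : (pvRev adj).values = (pvRev adj).keys.map (pvMembers adj) := by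
    rw [PySem.Dict.values_eq_map_keys (pvRev adj) hnd []]
    exact List.map_congr_left (fun k _ => pv_rev_getD adj k)
  have hv0 : 0 ≤ v := by omega
  have hlen : (List.replicate ((adj.length : Int)).toNat
      (PySem.Dict.empty : PySem.Dict Int Int)).length = adj.length := by simp
  rw [pv_wedge_flat]
  have hmem : ∀ p ∈ ((pvRev adj).values.flatMap (fun m => pvEmit [] m)),
      0 ≤ p.2 ∧ p.2.toNat < (List.replicate ((adj.length : Int)).toNat
        (PySem.Dict.empty : PySem.Dict Int Int)).length := by
    intro p hp
    obtain ⟨m, hm, hpe⟩ := List.mem_flatMap.mp hp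
    rw [hvals] at hm
    obtain ⟨w, _, rfl⟩ := List.mem_map.mp hm
    have h2 := pv_emit_mem_snd (pvMembers adj w) [] p hpe
    have h3 := (List.mem_filter.mp h2).1
    obtain ⟨hb0, hbn⟩ := (pv_mem_range adj.length p.2).mp h3
    rw [hlen]
    omega
  rw [pv_cnt_fold_read _ _ hmem u v hv0 (by rw [hlen]; omega)]
  have hinit : pvCntRead (List.replicate ((adj.length : Int)).toNat
      (PySem.Dict.empty : PySem.Dict Int Int)) u v = 0 := by
    unfold pvCntRead
    rw [PySem.List.pyGetD_of_nonneg _ _ hv0, List.getD_eq_getElem _ _ (by simpa using (by omega : v.toNat < ((adj.length : Int)).toNat)), List.getElem_replicate]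
    rfl
  rw [hinit, zero_add, hvals, List.count_flatMap, List.map_map]
  have hcnt : ∀ w ∈ (pvRev adj).keys,
      ((List.count (u, v) ∘ (fun m => pvEmit [] m)) ∘ pvMembers adj) w
        = if w ∈ pvAdjG adj u ∧ w ∈ pvAdjG adj v then (1 : Nat) else 0 := by
    intro w _
    have h := pv_emit_count u v (pvMembers adj w) []
      (by simpa using pv_members_pairwise adj w)
    simp only [List.nil_append] at h
    show List.count (u, v) (pvEmit [] (pvMembers adj w)) = _
    rw [h]
    have hmu : u ∈ pvMembers adj w ↔ w ∈ pvAdjG adj u := by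
      simp [pvMembers, List.mem_filter, pv_mem_range adj.length u, hu0, hun]
    have hmv : v ∈ pvMembers adj w ↔ w ∈ pvAdjG adj v := by
      simp [pvMembers, List.mem_filter, pv_mem_range adj.length v]
      omega
    simp [hmu, hmv, huv, and_comm]
  rw [List.map_congr_left hcnt, pv_sum_indicator]
  have hfin : ((pvRev adj).keys.filter
        (fun w => decide (w ∈ pvAdjG adj u ∧ w ∈ pvAdjG adj v))).length
      = ((PySem.Set.ofList (PySem.List.pyGetD adj u [])).filter
          (fun x => (PySem.List.pyGetD adj v []).contains x)).length := by
    rw [← List.toFinset_card_of_nodup (hnd.filter _),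
      ← List.toFinset_card_of_nodup ((PySem.Set.nodup_ofList _).filter _)]
    congr 1
    ext w
    simp only [List.mem_toFinset, List.mem_filter, decide_eq_true_eq,
      List.contains_eq_mem]
    constructor
    · rintro ⟨_, h1, h2⟩
      refine ⟨h1, ?_⟩
      have : w ∈ PySem.Set.ofList (PySem.List.pyGetD adj v []) := h2
      simpa [PySem.Set.mem_ofList] using this
    · rintro ⟨h1, h2⟩
      refine ⟨?_, h1, by simpa [pvAdjG, PySem.Set.mem_ofList] using h2⟩
      rw [pv_rev_keys_mem]
      exact ⟨u, (pv_mem_range adj.length u).mpr ⟨hu0, hun⟩, h1⟩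
  rw [hfin]
  rfl

theorem pv_edge_facts (adj : List (List Int)) (tm : Int)
    (hpre : Pre_count_triangle_histogram adj tm) (p : Int × Int) (hp : p ∈ pvEdges adj) :
    0 ≤ p.1 ∧ p.1 < (adj.length : Int) ∧ p.1 < p.2 ∧ p.2 < (adj.length : Int) := by
  obtain ⟨hp1, hp2⟩ := List.mem_filter.mp hp
  obtain ⟨u, hu, hm⟩ := List.mem_flatMap.mp hp1
  obtain ⟨v, hv, rfl⟩ := List.mem_map.mp hm
  obtain ⟨h0, h1⟩ := (pv_mem_range adj.length u).mp hu
  have huv : u < v := by simpa using hp2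
  have hvrow : v ∈ PySem.List.pyGetD adj u [] := by
    simpa [pvAdjG, PySem.Set.mem_ofList] using hv
  have hnat : u.toNat < adj.length := by omega
  have hvg : v ∈ adj[u.toNat] := by
    rw [PySem.List.pyGetD_of_nonneg _ _ h0] at hvrow
    rwa [List.getD_eq_getElem _ _ hnat] at hvrow
  have := hpre.2 u.toNat hnat v hvg (by omega)
  exact ⟨h0, h1, huv, this⟩

theorem pv_B_fold (adj : List (List Int)) (t : Int)
    (hpre : Pre_count_triangle_histogram adj t) :
    ((PySem.List.pyRange 0 (adj.length : Int) 1).foldl (fun st u =>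
      (PySem.Set.ofList (PySem.List.pyGetD adj u [])).foldl (fun st v =>
        if v > u then
          (st.1 + 1,
            PySem.List.pySetD st.2
              (if (PySem.List.pyGetD (((PySem.List.pyRange 0 (adj.length : Int) 1).foldl (fun d x =>
                    (PySem.Set.ofList (PySem.List.pyGetD adj x [])).foldl (fun d w =>
                      d.modify w [] (· ++ [x])) d) PySem.Dict.empty).values.foldl
                      (fun cnt members =>
                        (members.foldl (fun st b =>
                          (st.2.foldl (fun cnt a =>
                            PySem.List.pySetD cnt b
                              ((PySem.List.pyGetD cnt b PySem.Dict.empty).insert a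
                                ((PySem.List.pyGetD cnt b PySem.Dict.empty).getD a 0 + 1))) st.1,
                           st.2 ++ [b])) (cnt, ([] : List Int))).1)
                      (List.replicate ((adj.length : Int)).toNat PySem.Dict.empty)) v
                    PySem.Dict.empty).getD u 0 < t then
                (PySem.List.pyGetD (((PySem.List.pyRange 0 (adj.length : Int) 1).foldl (fun d x =>
                    (PySem.Set.ofList (PySem.List.pyGetD adj x [])).foldl (fun d w =>
                      d.modify w [] (· ++ [x])) d) PySem.Dict.empty).values.foldl
                      (fun cnt members =>
                        (members.foldl (fun st b =>
                          (st.2.foldl (fun cnt a =>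
                            PySem.List.pySetD cnt b
                              ((PySem.List.pyGetD cnt b PySem.Dict.empty).insert a
                                ((PySem.List.pyGetD cnt b PySem.Dict.empty).getD a 0 + 1))) st.1,
                           st.2 ++ [b])) (cnt, ([] : List Int))).1)
                      (List.replicate ((adj.length : Int)).toNat PySem.Dict.empty)) v
                    PySem.Dict.empty).getD u 0
              else t)
              (PySem.List.pyGetD st.2
                (if (PySem.List.pyGetD (((PySem.List.pyRange 0 (adj.length : Int) 1).foldl (fun d x =>
                      (PySem.Set.ofList (PySem.List.pyGetD adj x [])).foldl (fun d w =>
                        d.modify w [] (· ++ [x])) d) PySem.Dict.empty).values.foldl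
                        (fun cnt members =>
                          (members.foldl (fun st b =>
                            (st.2.foldl (fun cnt a =>
                              PySem.List.pySetD cnt b
                                ((PySem.List.pyGetD cnt b PySem.Dict.empty).insert a
                                  ((PySem.List.pyGetD cnt b PySem.Dict.empty).getD a 0 + 1))) st.1,
                             st.2 ++ [b])) (cnt, ([] : List Int))).1)
                        (List.replicate ((adj.length : Int)).toNat PySem.Dict.empty)) v
                      PySem.Dict.empty).getD u 0 < t then
                  (PySem.List.pyGetD (((PySem.List.pyRange 0 (adj.length : Int) 1).foldl (fun d x =>
                      (PySem.Set.ofList (PySem.List.pyGetD adj x [])).foldl (fun d w =>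
                        d.modify w [] (· ++ [x])) d) PySem.Dict.empty).values.foldl
                        (fun cnt members =>
                          (members.foldl (fun st b =>
                            (st.2.foldl (fun cnt a =>
                              PySem.List.pySetD cnt b
                                ((PySem.List.pyGetD cnt b PySem.Dict.empty).insert a
                                  ((PySem.List.pyGetD cnt b PySem.Dict.empty).getD a 0 + 1))) st.1,
                             st.2 ++ [b])) (cnt, ([] : List Int))).1)
                        (List.replicate ((adj.length : Int)).toNat PySem.Dict.empty)) v
                      PySem.Dict.empty).getD u 0
                else t) 0 + 1))
        else st) st)
      ((0 : Int), List.replicate (t + 1).toNat 0))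
    = ((0 : Int) + ((pvEdges adj).length : Int), pvHist adj t) := by
  refine (pv_foldl_nested (PySem.List.pyRange 0 (adj.length : Int) 1)
    (fun u => PySem.Set.ofList (PySem.List.pyGetD adj u [])) _
    ((0 : Int), List.replicate (t + 1).toNat 0)).trans ?_
  calc _
      = (pvPairs adj).foldl (fun st p =>
          if (fun q : Int × Int => decide (q.1 < q.2)) p = true then
            (st.1 + 1, pvBump st.2
              (if pvCntRead ((pvRev adj).values.foldl (fun cnt members =>
                    (members.foldl (fun st b =>
                      (st.2.foldl (fun cnt a =>
                        PySem.List.pySetD cnt b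
                          ((PySem.List.pyGetD cnt b PySem.Dict.empty).insert a
                            ((PySem.List.pyGetD cnt b PySem.Dict.empty).getD a 0 + 1))) st.1,
                       st.2 ++ [b])) (cnt, ([] : List Int))).1)
                    (List.replicate ((adj.length : Int)).toNat PySem.Dict.empty)) p.1 p.2 < t then
                pvCntRead ((pvRev adj).values.foldl (fun cnt members =>
                    (members.foldl (fun st b =>
                      (st.2.foldl (fun cnt a =>
                        PySem.List.pySetD cnt b
                          ((PySem.List.pyGetD cnt b PySem.Dict.empty).insert a
                            ((PySem.List.pyGetD cnt b PySem.Dict.empty).getD a 0 + 1))) st.1,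
                       st.2 ++ [b])) (cnt, ([] : List Int))).1)
                    (List.replicate ((adj.length : Int)).toNat PySem.Dict.empty)) p.1 p.2
              else t)) else st)
          ((0 : Int), List.replicate (t + 1).toNat 0) := by
        apply PySem.List.foldl_congr_mem
        intro acc p _
        rcases p with ⟨a, b⟩
        by_cases hab : a < b <;> simp [hab, pvBump, pvRev, pvAdjG, pvCntRead]
    _ = (pvEdges adj).foldl (fun st p =>
          (st.1 + 1, pvBump st.2
            (if pvCntRead ((pvRev adj).values.foldl (fun cnt members =>
                  (members.foldl (fun st b =>
                    (st.2.foldl (fun cnt a =>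
                      PySem.List.pySetD cnt b
                        ((PySem.List.pyGetD cnt b PySem.Dict.empty).insert a
                          ((PySem.List.pyGetD cnt b PySem.Dict.empty).getD a 0 + 1))) st.1,
                     st.2 ++ [b])) (cnt, ([] : List Int))).1)
                  (List.replicate ((adj.length : Int)).toNat PySem.Dict.empty)) p.1 p.2 < t then
              pvCntRead ((pvRev adj).values.foldl (fun cnt members =>
                  (members.foldl (fun st b =>
                    (st.2.foldl (fun cnt a =>
                      PySem.List.pySetD cnt b
                        ((PySem.List.pyGetD cnt b PySem.Dict.empty).insert a
                          ((PySem.List.pyGetD cnt b PySem.Dict.empty).getD a 0 + 1))) st.1,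
                     st.2 ++ [b])) (cnt, ([] : List Int))).1)
                  (List.replicate ((adj.length : Int)).toNat PySem.Dict.empty)) p.1 p.2
            else t)))
          ((0 : Int), List.replicate (t + 1).toNat 0) := by
        rw [pvEdges, List.foldl_filter]
    _ = (pvEdges adj).foldl (fun st p => (st.1 + 1, pvBump st.2 (pvCap adj t p)))
          ((0 : Int), List.replicate (t + 1).toNat 0) := by
        apply PySem.List.foldl_congr_mem
        intro acc p hp
        obtain ⟨h0, h1, h2, h3⟩ := pv_edge_facts adj t hpre p hp
        rcases p with ⟨a, b⟩
        have hW := pv_cnt_getD adj a b h0 h1 h2 h3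
        rw [hW, pvCap]
    _ = ((0 : Int) + ((pvEdges adj).length : Int), pvHist adj t) := by
        rw [PySem.List.foldl_prod_mk (fun s (_ : Int × Int) => s + 1)
          (fun h p => pvBump h (pvCap adj t p)), pv_foldl_count]
        rfl

theorem pv_B_eq (adj : List (List Int)) (t : Int)
    (hpre : Pre_count_triangle_histogram adj t) :
    count_triangle_histogram_alt adj t =
      PySem.List.pySetD (pvHist adj t) 0
        (PySem.List.pyGetD (pvHist adj t) 0 0 +
          (PySem.Int.floordiv ((adj.length : Int) * ((adj.length : Int) - 1)) 2
            - ((pvEdges adj).length : Int))) := by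
  simp only [count_triangle_histogram_alt]
  rw [pv_B_fold adj t hpre]
  simp

theorem pv_main (adj : List (List Int)) (t : Int)
    (hpre : Pre_count_triangle_histogram adj t) :
    count_triangle_histogram adj t = count_triangle_histogram_alt adj t := by
  have hsum : (pvHist adj t).sum = ((pvEdges adj).length : Int) := by
    obtain ⟨hs, _⟩ := pv_fold_bump t hpre.1 (pvCap adj t) (pvEdges adj)
      (fun p _ => pv_cap_bounds adj t p hpre.1) (List.replicate (t + 1).toNat 0) (by simp)
    rw [pvHist, hs]
    simp
  rw [pv_A_eq adj t, pv_B_eq adj t hpre, hsum]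

-- ===== VERDICT (by name: the statement is the Claim_ definition above) =====
theorem count_triangle_histogram_spec : Claim_equal_count_triangle_histogram := by
  intro adj t _ hpre
  unfold Spec_count_triangle_histogram
  exact pv_main adj t hpre
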